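-- pv_equiv track=rewrite | github.com/boujonlaurin-dotcom/facteur | packages/api/alembic/baseline/sanitize.py | _drop_alembic_version_table
-- ===== SOURCE A (Python) =====
-- def _drop_alembic_version_table(lines: list[str]) -> list[str]:
--     """Strip the `CREATE TABLE ... alembic_version (...)` block.
--
--     Alembic creates this table itself with its own PK on `version_num`. Letting
--     the dump recreate it causes the subsequent ADD CONSTRAINT on the same
--     column to fail with `multiple primary keys`.
--     """
--     out: list[str] = []
--     i = 0
--     while i < len(lines):
--         line = lines[i]
--         if "CREATE TABLE" in line and "alembic_version" in line:
--             while i < len(lines) and not lines[i].rstrip().endswith(";"):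
--                 i += 1
--             i += 1
--             continue
--         out.append(line)
--         i += 1
--     return out
-- ===== SOURCE B (Python) =====
-- def _drop_alembic_version_table(lines: list[str]) -> list[str]:
--     """Strip the `CREATE TABLE ... alembic_version (...)` block.
--
--     Single flat pass keeping a boolean `skipping` state instead of an index
--     with an inner while-loop.
--     """
--     out: list[str] = []
--     skipping = False
--     for line in lines:
--         if skipping:
--             if line.rstrip().endswith(";"):
--                 skipping = False
--         elif "CREATE TABLE" in line and "alembic_version" in line:
--             skipping = not line.rstrip().endswith(";")
--         else:
--             out.append(line)
--     return out
-- ===== Notes on version B (the rewrite author's own statement) =====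
-- stated objective: simpler
-- what changed: Replaced the explicit index with an inner while-loop by a flat single for-loop over the lines carrying a boolean skipping flag cleared on the first ';'-terminated line.
import Mathlib
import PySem

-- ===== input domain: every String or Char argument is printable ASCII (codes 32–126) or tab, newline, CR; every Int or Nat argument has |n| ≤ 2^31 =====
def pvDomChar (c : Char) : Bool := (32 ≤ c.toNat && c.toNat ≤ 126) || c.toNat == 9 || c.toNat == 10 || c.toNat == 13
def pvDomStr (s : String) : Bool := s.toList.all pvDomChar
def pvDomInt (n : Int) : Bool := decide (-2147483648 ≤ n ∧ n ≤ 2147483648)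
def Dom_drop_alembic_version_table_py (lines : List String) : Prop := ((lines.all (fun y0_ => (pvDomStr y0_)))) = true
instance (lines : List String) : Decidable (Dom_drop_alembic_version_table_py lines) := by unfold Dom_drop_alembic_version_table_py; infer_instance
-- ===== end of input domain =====

-- B replaces A's index-with-inner-while by a flat single pass carrying a boolean skipping flag (objective: simpler).


-- ===== PORT A =====
-- lines[i].rstrip().endswith(";")
def pvEndsSemi (line : String) : Bool := PySem.Str.endswith (PySem.Str.rstrip line) ";"

-- "CREATE TABLE" in line and "alembic_version" in line
def pvMarker (line : String) : Bool :=
  PySem.Str.isIn "CREATE TABLE" line && PySem.Str.isIn "alembic_version" line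

-- the inner 'while i < len(lines) and not lines[i].rstrip().endswith(";"): i += 1'
def pvSkipTo (lines : List String) (i : Nat) : Nat :=
  if h : i < lines.length then
    if pvEndsSemi lines[i] then i else pvSkipTo lines (i + 1)
  else i
termination_by lines.length - i

theorem pvSkipTo_ge (lines : List String) (i : Nat) : i ≤ pvSkipTo lines i := by
  unfold pvSkipTo
  split
  · split
    · exact le_refl i
    · exact le_trans (Nat.le_succ i) (pvSkipTo_ge lines (i + 1))
  · exact le_refl i
termination_by lines.length - i

-- the outer 'while i < len(lines)' loop of A (out is built by the cons/append structure)
def pvALoop (lines : List String) (i : Nat) : List String :=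
  if h : i < lines.length then
    let line := lines[i]
    if pvMarker line then pvALoop lines (pvSkipTo lines i + 1)
    else line :: pvALoop lines (i + 1)
  else []
termination_by lines.length - i
decreasing_by
  · have := pvSkipTo_ge lines i; omega
  · omega

def drop_alembic_version_table_py (lines : List String) : List String := pvALoop lines 0

-- ===== PORT B =====
-- the flat for-loop of B with the boolean `skipping` state
def pvBLoop : List String → Bool → List String
  | [], _ => []
  | line :: rest, true =>
      if pvEndsSemi line then pvBLoop rest false else pvBLoop rest true
  | line :: rest, false =>
      if pvMarker line then pvBLoop rest (!pvEndsSemi line)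
      else line :: pvBLoop rest false

def drop_alembic_version_table_py_alt (lines : List String) : List String :=
  pvBLoop lines false

-- ===== PRECONDITION & SPEC =====
def Spec_drop_alembic_version_table_py (lines : List String) (out : List String) : Prop := out = drop_alembic_version_table_py_alt lines
instance (lines : List String) (out : List String) : Decidable (Spec_drop_alembic_version_table_py lines out) := by unfold Spec_drop_alembic_version_table_py; infer_instance

-- ===== CLAIM (what is proved, stated in full; the proofs are below) =====
def Claim_equal_drop_alembic_version_table_py : Prop := ∀ (lines : List String), Dom_drop_alembic_version_table_py lines → Spec_drop_alembic_version_table_py lines (drop_alembic_version_table_py lines)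

-- ===== LEMMAS AND PROOFS =====

-- B's skipping state consumes exactly A's inner while-loop plus the terminating ';' line
theorem pvBLoop_skip (lines : List String) (j : Nat) :
    pvBLoop (lines.drop j) true = pvBLoop (lines.drop (pvSkipTo lines j + 1)) false := by
  by_cases h : j < lines.length
  · rw [List.drop_eq_getElem_cons h]
    unfold pvSkipTo
    rw [dif_pos h]
    by_cases hs : pvEndsSemi lines[j]
    · rw [if_pos hs]
      simp only [pvBLoop, if_pos hs]
    · rw [if_neg hs]
      simp only [pvBLoop, if_neg hs]
      exact pvBLoop_skip lines (j + 1)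
  · have hd : lines.drop j = [] := List.drop_eq_nil_of_le (by omega)
    have hj : pvSkipTo lines j = j := by unfold pvSkipTo; rw [dif_neg h]
    have hd2 : lines.drop (j + 1) = [] :=
      List.drop_eq_nil_of_le (by omega)
    rw [hd, hj, hd2]
    simp only [pvBLoop]
termination_by lines.length - j

theorem pvALoop_eq_pvBLoop (lines : List String) (i : Nat) :
    pvALoop lines i = pvBLoop (lines.drop i) false := by
  by_cases h : i < lines.length
  · rw [List.drop_eq_getElem_cons h]
    unfold pvALoop
    rw [dif_pos h]
    by_cases hm : pvMarker lines[i]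
    · rw [if_pos hm]
      simp only [pvBLoop, if_pos hm]
      by_cases hs : pvEndsSemi lines[i]
      · have hi : pvSkipTo lines i = i := by
          unfold pvSkipTo; rw [dif_pos h, if_pos hs]
        rw [hi, hs]
        simp only [Bool.not_true]
        have := pvSkipTo_ge lines (i + 1)
        exact pvALoop_eq_pvBLoop lines (i + 1)
      · have hi : pvSkipTo lines i = pvSkipTo lines (i + 1) := by
          unfold pvSkipTo
          rw [dif_pos h, if_neg hs]
          rw [pvSkipTo]
        rw [hi, Bool.not_eq_true] at *
        rw [(Bool.eq_false_iff.mpr ?_ : pvEndsSemi lines[i] = false)]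
        · simp only [Bool.not_false]
          rw [pvBLoop_skip lines (i + 1)]
          have := pvSkipTo_ge lines (i + 1)
          exact pvALoop_eq_pvBLoop lines (pvSkipTo lines (i + 1) + 1)
        · simpa using hs
    · rw [if_neg hm]
      simp only [pvBLoop, if_neg hm]
      rw [pvALoop_eq_pvBLoop lines (i + 1)]
  · have hd : lines.drop i = [] := List.drop_eq_nil_of_le (by omega)
    unfold pvALoop
    rw [dif_neg h, hd]
    simp only [pvBLoop]
termination_by lines.length - i
decreasing_by
  · omega
  · have := pvSkipTo_ge lines (i + 1); omega
  · omega

-- ===== VERDICT (by name: the statement is the Claim_ definition above) =====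
theorem drop_alembic_version_table_py_spec : Claim_equal_drop_alembic_version_table_py := by
  intro lines _
  unfold Spec_drop_alembic_version_table_py drop_alembic_version_table_py drop_alembic_version_table_py_alt
  simpa using pvALoop_eq_pvBLoop lines 0
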